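-- pv_equiv track=rewrite | github.com/Ombhavsar218/redscan | rescanai/scan_controller.py | _get_xss_test_messages
-- ===== SOURCE A (Python) =====
-- from typing import Dict, List, Any, Optional, Callable
--
-- def _get_xss_test_messages(step_count: int) -> List[str]:
--     """Generate different XSS test messages"""
--     base_messages = [
--         "Initializing XSS scanner...",
--         "Testing reflected XSS...",
--         "Checking stored XSS...",
--         "Testing DOM-based XSS...",
--         "Analyzing input fields...",
--         "Checking search boxes...",
--         "Testing comment forms...",
--         "Analyzing URL parameters...",
--         "Checking form submissions...",
--         "Testing JavaScript contexts...",
--         "Analyzing HTML attributes...",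
--         "Checking CSS contexts...",
--         "Testing event handlers...",
--         "Analyzing script tags...",
--         "Checking iframe sources...",
--         "Testing input validation...",
--         "Analyzing output encoding...",
--         "Checking filter bypasses...",
--         "Testing payload variations...",
--         "Analyzing browser responses...",
--         "Checking for XSS sinks...",
--         "Testing content injection...",
--         "Analyzing sanitization...",
--         "Checking CSP effectiveness...",
--         "Verifying XSS protection...",
--         "Finalizing XSS assessment..."
--     ]
--
--     messages = []
--     for i in range(step_count):
--         messages.append(base_messages[i % len(base_messages)])
--     return messages
-- ===== SOURCE B (Python) =====
-- from typing import Dict, List, Any, Optional, Callable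
--
-- def _get_xss_test_messages(step_count: int) -> List[str]:
--     """Generate different XSS test messages"""
--     base_messages = [
--         "Initializing XSS scanner...",
--         "Testing reflected XSS...",
--         "Checking stored XSS...",
--         "Testing DOM-based XSS...",
--         "Analyzing input fields...",
--         "Checking search boxes...",
--         "Testing comment forms...",
--         "Analyzing URL parameters...",
--         "Checking form submissions...",
--         "Testing JavaScript contexts...",
--         "Analyzing HTML attributes...",
--         "Checking CSS contexts...",
--         "Testing event handlers...",
--         "Analyzing script tags...",
--         "Checking iframe sources...",
--         "Testing input validation...",
--         "Analyzing output encoding...",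
--         "Checking filter bypasses...",
--         "Testing payload variations...",
--         "Analyzing browser responses...",
--         "Checking for XSS sinks...",
--         "Testing content injection...",
--         "Analyzing sanitization...",
--         "Checking CSP effectiveness...",
--         "Verifying XSS protection...",
--         "Finalizing XSS assessment..."
--     ]
--     if step_count <= 0:
--         return []
--     q, r = divmod(step_count, len(base_messages))
--     return base_messages * q + base_messages[:r]
-- ===== Notes on version B (the rewrite author's own statement) =====
-- stated objective: simpler
-- what changed: Replaces the element-by-element modulo-indexed append loop with one bulk construction: full repetitions via list multiplication plus a slice for the remainder, after an early guard for step_count <= 0.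
import Mathlib
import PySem

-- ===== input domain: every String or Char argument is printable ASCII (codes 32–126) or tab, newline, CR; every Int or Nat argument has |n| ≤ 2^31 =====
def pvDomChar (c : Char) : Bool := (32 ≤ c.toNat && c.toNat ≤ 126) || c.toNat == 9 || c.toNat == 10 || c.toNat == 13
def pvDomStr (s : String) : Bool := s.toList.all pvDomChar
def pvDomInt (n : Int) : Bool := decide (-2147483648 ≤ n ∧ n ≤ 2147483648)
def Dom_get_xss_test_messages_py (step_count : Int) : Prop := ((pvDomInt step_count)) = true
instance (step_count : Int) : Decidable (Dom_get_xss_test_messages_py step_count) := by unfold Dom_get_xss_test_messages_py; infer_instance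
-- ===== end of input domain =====

-- B replaces A's per-element modulo-indexed append loop with one bulk construction
-- (full repetitions by list multiplication plus a slice for the remainder); equal outputs, simpler code.

-- the base_messages literal (identical in A and B)
def xssBaseMessages : List String := [
  "Initializing XSS scanner...",
  "Testing reflected XSS...",
  "Checking stored XSS...",
  "Testing DOM-based XSS...",
  "Analyzing input fields...",
  "Checking search boxes...",
  "Testing comment forms...",
  "Analyzing URL parameters...",
  "Checking form submissions...",
  "Testing JavaScript contexts...",
  "Analyzing HTML attributes...",
  "Checking CSS contexts...",
  "Testing event handlers...",
  "Analyzing script tags...",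
  "Checking iframe sources...",
  "Testing input validation...",
  "Analyzing output encoding...",
  "Checking filter bypasses...",
  "Testing payload variations...",
  "Analyzing browser responses...",
  "Checking for XSS sinks...",
  "Testing content injection...",
  "Analyzing sanitization...",
  "Checking CSP effectiveness...",
  "Verifying XSS protection...",
  "Finalizing XSS assessment..."]

-- ===== PORT A =====
-- for i in range(step_count): messages.append(base_messages[i % len(base_messages)])
-- (i % 26 is always in range, so base_messages[...] never raises; pyGetD with default "" is exact here)
def get_xss_test_messages_py (step_count : Int) : List String :=
  (PySem.List.pyRange 0 step_count 1).foldl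
    (fun messages i =>
      messages ++ [PySem.List.pyGetD xssBaseMessages (PySem.Int.mod i (xssBaseMessages.length : Int)) ""])
    []

-- ===== PORT B =====
-- early guard, then q, r = divmod(step_count, 26); base * q + base[:r]
def get_xss_test_messages_py_alt (step_count : Int) : List String :=
  if step_count ≤ 0 then []
  else
    let q := PySem.Int.floordiv step_count (xssBaseMessages.length : Int)
    let r := PySem.Int.mod step_count (xssBaseMessages.length : Int)
    (List.replicate q.toNat xssBaseMessages).flatten ++ PySem.List.slice xssBaseMessages none (some r)

-- ===== PRECONDITION & SPEC =====
def Spec_get_xss_test_messages_py (step_count : Int) (out : List String) : Prop := out = get_xss_test_messages_py_alt step_count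
instance (step_count : Int) (out : List String) : Decidable (Spec_get_xss_test_messages_py step_count out) := by unfold Spec_get_xss_test_messages_py; infer_instance

-- ===== CLAIM (what is proved, stated in full; the proofs are below) =====
def Claim_equal_get_xss_test_messages_py : Prop := ∀ (step_count : Int), Dom_get_xss_test_messages_py step_count → Spec_get_xss_test_messages_py step_count (get_xss_test_messages_py step_count)

-- ===== LEMMAS AND PROOFS =====

-- the core fact: reading a list cyclically m times = whole copies ++ leading remainder
theorem cycle_map_eq (xs : List String) (d : String) (hL : xs.length = 26) :
    ∀ m : Nat, (List.range m).map (fun k => xs.getD (k % 26) d)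
      = (List.replicate (m / 26) xs).flatten ++ xs.take (m % 26) := by
  intro m
  induction m with
  | zero => simp
  | succ m ih =>
    rw [List.range_succ, List.map_append, ih]
    have hlt : m % 26 < xs.length := by omega
    have hstep : xs.take (m % 26) ++ [xs.getD (m % 26) d] = xs.take (m % 26 + 1) := by
      rw [List.take_add_one, List.getD_eq_getElem xs d hlt,
        List.getElem?_eq_getElem hlt, Option.toList_some]
    rw [List.append_assoc]
    simp only [List.map_cons, List.map_nil]
    rw [hstep]
    by_cases h : m % 26 = 25
    · have hdiv : (m + 1) / 26 = m / 26 + 1 := by omega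
      have hmod : (m + 1) % 26 = 0 := by omega
      rw [hdiv, hmod, h, List.replicate_succ', List.flatten_append, List.take_zero,
        List.append_nil, List.flatten_cons, List.flatten_nil, List.append_nil]
      congr 1
      rw [show (25 + 1 : Nat) = xs.length by omega, List.take_length]
    · have hdiv : (m + 1) / 26 = m / 26 := by omega
      have hmod : (m + 1) % 26 = m % 26 + 1 := by omega
      rw [hdiv, hmod]

theorem xssBase_length : xssBaseMessages.length = 26 := by decide

-- ===== VERDICT (by name: the statement is the Claim_ definition above) =====
theorem get_xss_test_messages_py_spec : Claim_equal_get_xss_test_messages_py := by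
  intro n _
  unfold Spec_get_xss_test_messages_py get_xss_test_messages_py get_xss_test_messages_py_alt
  by_cases hn : n ≤ 0
  · rw [PySem.List.pyRange_one_eq_nil hn]
    simp [hn]
  · rw [Int.not_le] at hn
    simp only [if_neg (by omega : ¬ n ≤ 0)]
    obtain ⟨m, rfl⟩ : ∃ m : Nat, n = (m : Int) := ⟨n.toNat, by omega⟩
    rw [PySem.List.foldl_append_singleton_eq_map, PySem.List.pyRange_one, List.nil_append,
      List.map_map, xssBase_length]
    simp only [Int.sub_zero, Int.toNat_natCast, Function.comp_def, zero_add,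
      PySem.Int.mod_natCast, PySem.List.pyGetD_natCast]
    rw [cycle_map_eq xssBaseMessages "" (by decide) m]
    simp only [PySem.Int.floordiv_natCast, Int.toNat_natCast]
    congr 1
    rw [PySem.List.slice_to _ (Int.natCast_nonneg _)]
    rw [show (((m % 26 : Nat) : Int)).toNat = m % 26 from by omega]
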